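-- pv_equiv track=rewrite | github.com/HelloSSIFI/HelloWorld | programmers/2022_코딩테스트_실전_대비_모의고사/s1_tlsqktem483.py | solution
-- ===== SOURCE A (Python) =====
-- def solution(X, Y):
--     X = sorted(X, reverse=True)
--     Y = sorted(Y, reverse=True)
--     if X in Y:
--         return X
--     elif Y in X:
--         return Y
--     if len(X) > len(Y):
--         A = list(X)
--         B = list(Y)
--     else:
--         A = list(Y)
--         B = list(X)
--     visited = [False] * len(B)
--     answer = ''
--
--     for a in A:
--         if visited == [True] * len(B):
--             break
--         for b in range(len(B)):
--             if a == B[b] and not visited[b]: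
--                 answer += a
--                 visited[b] = True
--                 break
--     if not answer:
--         answer = "-1"
--     elif answer == "0" * len(answer):
--         answer = "0"
--     return answer
-- ===== SOURCE B (Python) =====
-- def solution(X, Y):
--     common = set(X) & set(Y)
--     answer = ''.join(c * min(X.count(c), Y.count(c))
--                      for c in sorted(common, reverse=True))
--     if not answer:
--         return "-1"
--     if all(ch == '0' for ch in answer):
--         return "0"
--     return answer
-- ===== Notes on version B (the rewrite author's own statement) =====
-- stated objective: faster
-- what changed: Replaces the nested visited-array scan over the two sorted lists by per-character counting: build the set of common characters, sort it descending once, and emit each character min(count in X, count in Y) times.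
import Mathlib
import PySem

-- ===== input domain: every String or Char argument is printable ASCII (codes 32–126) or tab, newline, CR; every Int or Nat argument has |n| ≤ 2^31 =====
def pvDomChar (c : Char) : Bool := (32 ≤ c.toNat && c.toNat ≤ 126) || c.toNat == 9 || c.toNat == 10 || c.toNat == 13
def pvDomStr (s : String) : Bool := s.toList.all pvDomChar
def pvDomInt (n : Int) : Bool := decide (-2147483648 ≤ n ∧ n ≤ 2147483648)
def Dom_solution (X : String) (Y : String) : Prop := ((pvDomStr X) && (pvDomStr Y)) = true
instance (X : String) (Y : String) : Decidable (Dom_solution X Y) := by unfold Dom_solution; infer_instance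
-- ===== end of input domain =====

-- B replaces A's nested visited-array scan by per-character counting over the sorted set of
-- common characters (measured faster at large sizes); both return the descending multiset
-- intersection, '-1' if empty, collapsed to '0' if all zeros.

-- ===== PORT A =====
-- Python's 'X in Y' here asks whether the LIST X occurs as an ELEMENT of the char list Y;
-- a list never equals a char in Python, so the test is always False (exact): dead branch.
def pvListInChars (_X : List Char) (Y : List Char) : Bool := Y.any (fun _ => false)

-- inner 'for b in range(len(B))' loop: walks B and visited in step (same index b);
-- returns the updated visited list when a match is found ('break'), none when the loop falls through
def pvInner (a : Char) : List Char → List Bool → Option (List Bool)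
  | b :: bs, v :: vs =>
      if b == a && !v then some (true :: vs)
      else
        match pvInner a bs vs with
        | some vs' => some (v :: vs')
        | none => none
  | _, _ => none

-- outer 'for a in A' loop with the 'visited == [True]*len(B): break' early exit
def pvLoopA (B : List Char) : List Char → List Bool → List Char → List Char
  | [], _, ans => ans
  | a :: rest, visited, ans =>
      if visited = List.replicate B.length true then ans
      else
        match pvInner a B visited with
        | some vis' => pvLoopA B rest vis' (ans ++ [a])
        | none => pvLoopA B rest visited ans

def solution (X : String) (Y : String) : String :=
  let Xs := PySem.List.sorted X.toList (fun c => c) true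
  let Ys := PySem.List.sorted Y.toList (fun c => c) true
  if pvListInChars Xs Ys then String.ofList Xs       -- dead branch (see pvListInChars)
  else if pvListInChars Ys Xs then String.ofList Ys  -- dead branch
  else
    let AB := if Xs.length > Ys.length then (Xs, Ys) else (Ys, Xs)
    let ans := pvLoopA AB.2 AB.1 (List.replicate AB.2.length false) []
    if ans = [] then "-1"
    else if ans = PySem.List.pyRepeat ['0'] (ans.length : Int) then "0"
    else String.ofList ans

-- ===== PORT B =====
def solution_alt (X : String) (Y : String) : String :=
  let xs := X.toList
  let ys := Y.toList
  let common := PySem.Set.inter (PySem.Set.ofList xs) (PySem.Set.ofList ys)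
  let keys := PySem.List.sorted common (fun c => c) true
  -- ''.join(c * min(X.count(c), Y.count(c)) for c in keys); counts are Nats, so Python's min is Nat.min
  let answer := keys.flatMap (fun c => List.replicate (min (xs.count c) (ys.count c)) c)
  if answer = [] then "-1"
  else if answer.all (fun ch => ch == '0') then "0"
  else String.ofList answer

-- ===== PRECONDITION & SPEC =====
def Spec_solution (X : String) (Y : String) (out : String) : Prop := out = solution_alt X Y
instance (X : String) (Y : String) (out : String) : Decidable (Spec_solution X Y out) := by unfold Spec_solution; infer_instance

-- ===== CLAIM (what is proved, stated in full; the proofs are below) =====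
def Claim_equal_solution : Prop := ∀ (X : String) (Y : String), Dom_solution X Y → Spec_solution X Y (solution X Y)

-- ===== LEMMAS AND PROOFS =====

-- the characters of B sitting at not-yet-visited positions, in order
def pvUnvis : List Char → List Bool → List Char
  | b :: bs, v :: vs => if v then pvUnvis bs vs else b :: pvUnvis bs vs
  | _, _ => []

-- greedy multiset intersection by erasure: the abstract shape of A's outer loop
def pvInterE : List Char → List Char → List Char
  | [], _ => []
  | a :: as, rem => if a ∈ rem then a :: pvInterE as (rem.erase a) else pvInterE as rem

theorem pvInterE_nil (A : List Char) : pvInterE A [] = [] := by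
  induction A with
  | nil => rfl
  | cons a as ih => simp [pvInterE, ih]

theorem pvUnvis_replicate_false (B : List Char) :
    pvUnvis B (List.replicate B.length false) = B := by
  induction B with
  | nil => rfl
  | cons b bs ih => simp [pvUnvis, List.replicate, ih]

theorem pvUnvis_replicate_true (B : List Char) (n : Nat) :
    pvUnvis B (List.replicate n true) = [] := by
  induction B generalizing n with
  | nil => cases n <;> rfl
  | cons b bs ih =>
      cases n with
      | zero => rfl
      | succ m => simp [pvUnvis, List.replicate, ih]

theorem pvInner_none (a : Char) (B : List Char) (vis : List Bool)
    (h : pvInner a B vis = none) : a ∉ pvUnvis B vis := by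
  induction B generalizing vis with
  | nil => cases vis <;> simp [pvUnvis]
  | cons b bs ih =>
      cases vis with
      | nil => simp [pvUnvis]
      | cons v vs =>
          by_cases hb : (b == a && !v) = true
          · simp [pvInner, hb] at h
          · simp only [pvInner, hb] at h
            cases hinner : pvInner a bs vs with
            | some vs' => simp [hinner] at h
            | none =>
                have := ih vs hinner
                cases v with
                | true => simpa [pvUnvis] using this
                | false =>
                    simp only [Bool.not_false, Bool.and_true, beq_iff_eq] at hb
                    simp [pvUnvis, this, Ne.symm hb]

theorem pvInner_some (a : Char) (B : List Char) (vis : List Bool) (vis' : List Bool)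
    (h : pvInner a B vis = some vis') :
    a ∈ pvUnvis B vis ∧ pvUnvis B vis' = (pvUnvis B vis).erase a := by
  induction B generalizing vis vis' with
  | nil => cases vis <;> simp [pvInner] at h
  | cons b bs ih =>
      cases vis with
      | nil => simp [pvInner] at h
      | cons v vs =>
          by_cases hb : (b == a && !v) = true
          · simp only [pvInner, if_pos hb, Option.some.injEq] at h
            simp only [Bool.and_eq_true, beq_iff_eq, Bool.not_eq_true'] at hb
            obtain ⟨hba, hv⟩ := hb
            subst hba hv
            subst h
            simp [pvUnvis, List.erase_cons_head]
          · simp only [pvInner, if_neg hb] at h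
            cases hinner : pvInner a bs vs with
            | none => rw [hinner] at h; simp at h
            | some vs'' =>
                rw [hinner] at h
                simp only [Option.some.injEq] at h
                subst h
                obtain ⟨hmem, heq⟩ := ih vs vs'' hinner
                cases v with
                | true => simpa [pvUnvis, heq] using hmem
                | false =>
                    simp only [Bool.not_false, Bool.and_true, beq_iff_eq] at hb
                    refine ⟨by simp [pvUnvis, hmem], ?_⟩
                    simp [pvUnvis, heq, hb]

theorem pvLoopA_eq (B : List Char) (A : List Char) :
    ∀ (vis : List Bool) (ans : List Char),
      pvLoopA B A vis ans = ans ++ pvInterE A (pvUnvis B vis) := by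
  induction A with
  | nil => intro vis ans; simp [pvLoopA, pvInterE]
  | cons a rest ih =>
      intro vis ans
      by_cases hall : vis = List.replicate B.length true
      · subst hall
        simp [pvLoopA, pvUnvis_replicate_true, pvInterE_nil, pvInterE]
      · simp only [pvLoopA, hall, if_neg, not_false_iff]
        cases hinner : pvInner a B vis with
        | some vis' =>
            obtain ⟨hmem, heq⟩ := pvInner_some a B vis vis' hinner
            dsimp only
            rw [ih vis' (ans ++ [a])]
            simp [pvInterE, hmem, heq]
        | none =>
            have hnot := pvInner_none a B vis hinner
            dsimp only
            rw [ih vis ans]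
            simp [pvInterE, hnot]

theorem pvInterE_count (A : List Char) :
    ∀ (B : List Char) (c : Char),
      (pvInterE A B).count c = min (A.count c) (B.count c) := by
  induction A with
  | nil => intro B c; simp [pvInterE]
  | cons a as ih =>
      intro B c
      by_cases hmem : a ∈ B
      · simp only [pvInterE, if_pos hmem]
        by_cases hc : c = a
        · subst hc
          have h1 : 1 ≤ B.count c := List.one_le_count_iff.mpr hmem
          simp only [List.count_cons_self, ih, List.count_erase_self]
          omega
        · rw [List.count_cons_of_ne (Ne.symm hc), ih, List.count_erase_of_ne hc,
              List.count_cons_of_ne (Ne.symm hc)]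
      · simp only [pvInterE, if_neg hmem]
        rw [ih]
        by_cases hc : c = a
        · subst hc
          have h0 : B.count c = 0 := List.count_eq_zero.mpr hmem
          rw [List.count_cons_self]
          omega
        · rw [List.count_cons_of_ne (Ne.symm hc)]

theorem pvInterE_sublist (A : List Char) :
    ∀ B : List Char, (pvInterE A B).Sublist A := by
  induction A with
  | nil => intro B; simp [pvInterE]
  | cons a as ih =>
      intro B
      by_cases hmem : a ∈ B
      · simpa [pvInterE, hmem] using List.Sublist.cons₂ a (ih (B.erase a))
      · simpa [pvInterE, hmem] using List.Sublist.cons a (ih B)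

-- count of c in the flat concatenation of per-key replicate blocks, keys without duplicates
theorem pvFlatMap_count (m : Char → Nat) (keys : List Char) (hnd : keys.Nodup) (c : Char) :
    (keys.flatMap (fun k => List.replicate (m k) k)).count c
      = if c ∈ keys then m c else 0 := by
  induction keys with
  | nil => simp
  | cons k ks ih =>
      simp only [List.nodup_cons] at hnd
      rw [List.flatMap_cons, List.count_append, ih hnd.2]
      by_cases hc : c = k
      · subst hc
        simp [hnd.1]
      · simp [List.count_replicate, hc, Ne.symm hc]

theorem pvFlatMap_pairwise (m : Char → Nat) (keys : List Char)
    (h : keys.Pairwise (fun a b => b ≤ a)) :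
    (keys.flatMap (fun k => List.replicate (m k) k)).Pairwise (fun a b : Char => b ≤ a) := by
  induction keys with
  | nil => simp
  | cons k ks ih =>
      simp only [List.pairwise_cons] at h
      rw [List.flatMap_cons, List.pairwise_append]
      refine ⟨List.pairwise_replicate.mpr (Or.inr (le_refl k)), ih h.2, ?_⟩
      intro x hx y hy
      rw [List.eq_of_mem_replicate hx]
      obtain ⟨k', hk', hy'⟩ := List.mem_flatMap.mp hy
      rw [List.eq_of_mem_replicate hy']
      exact h.1 k' hk'

-- two descending lists with the same counts are equal
theorem pvDescUnique (l₁ l₂ : List Char)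
    (h1 : l₁.Pairwise (fun a b => b ≤ a)) (h2 : l₂.Pairwise (fun a b => b ≤ a))
    (hc : ∀ c, l₁.count c = l₂.count c) : l₁ = l₂ := by
  have hperm : l₁.reverse.Perm l₂.reverse :=
    (List.reverse_perm l₁).trans ((List.perm_iff_count.mpr hc).trans (List.reverse_perm l₂).symm)
  have e := PySem.List.eq_of_perm_of_pairwise_le_of_injective (l₁ := l₁.reverse) (l₂ := l₂.reverse)
    (fun c : Char => c) (fun _ _ h => h) hperm
    (List.pairwise_reverse.mpr h1) (List.pairwise_reverse.mpr h2)
  exact List.reverse_injective e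

-- the core of B, as a function of the raw character lists
def pvAnsB (xs ys : List Char) : List Char :=
  (PySem.List.sorted (PySem.Set.inter (PySem.Set.ofList xs) (PySem.Set.ofList ys))
      (fun c => c) true).flatMap
    (fun c => List.replicate (min (xs.count c) (ys.count c)) c)

theorem pvMem_inter (xs ys : List Char) (c : Char) :
    c ∈ PySem.Set.inter (PySem.Set.ofList xs) (PySem.Set.ofList ys) ↔ c ∈ xs ∧ c ∈ ys := by
  simp [PySem.Set.inter]

theorem pvAnsB_count (xs ys : List Char) (c : Char) :
    (pvAnsB xs ys).count c = min (xs.count c) (ys.count c) := by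
  have hnd : (PySem.List.sorted (PySem.Set.inter (PySem.Set.ofList xs) (PySem.Set.ofList ys))
      (fun c : Char => c) true).Nodup := by
    refine (PySem.List.sorted_perm _ _ _).nodup_iff.mpr ?_
    simp only [PySem.Set.inter]
    exact (PySem.Set.nodup_ofList xs).filter _
  rw [pvAnsB, pvFlatMap_count _ _ hnd]
  by_cases hmem : c ∈ PySem.List.sorted (PySem.Set.inter (PySem.Set.ofList xs) (PySem.Set.ofList ys)) (fun c : Char => c) true
  · rw [if_pos hmem]
  · rw [if_neg hmem]
    have hnotand : ¬ (c ∈ xs ∧ c ∈ ys) := fun hc =>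
      hmem (((PySem.List.sorted_perm _ _ _).mem_iff).mpr ((pvMem_inter xs ys c).mpr hc))
    rcases not_and_or.mp hnotand with h | h
    · rw [List.count_eq_zero.mpr h]; simp
    · rw [List.count_eq_zero.mpr h]; simp

theorem pvAnsB_pairwise (xs ys : List Char) :
    (pvAnsB xs ys).Pairwise (fun a b : Char => b ≤ a) :=
  pvFlatMap_pairwise _ _ (PySem.List.sorted_pairwise_rev _ _)

-- the core equality: A's greedy loop over the two descending sorts equals B's counted answer,
-- for either order of the two arguments
theorem pvCore_eq (xs ys : List Char) :
    pvInterE (PySem.List.sorted xs (fun c => c) true) (PySem.List.sorted ys (fun c => c) true)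
      = pvAnsB xs ys := by
  apply pvDescUnique
  · exact List.Pairwise.sublist (pvInterE_sublist _ _) (PySem.List.sorted_pairwise_rev _ _)
  · exact pvAnsB_pairwise xs ys
  · intro c
    rw [pvInterE_count, pvAnsB_count,
      (PySem.List.sorted_perm xs (fun c : Char => c) true).count_eq,
      (PySem.List.sorted_perm ys (fun c : Char => c) true).count_eq]

theorem pvCore_eq' (xs ys : List Char) :
    pvInterE (PySem.List.sorted ys (fun c => c) true) (PySem.List.sorted xs (fun c => c) true)
      = pvAnsB xs ys := by
  apply pvDescUnique
  · exact List.Pairwise.sublist (pvInterE_sublist _ _) (PySem.List.sorted_pairwise_rev _ _)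
  · exact pvAnsB_pairwise xs ys
  · intro c
    rw [pvInterE_count, pvAnsB_count,
      (PySem.List.sorted_perm xs (fun c : Char => c) true).count_eq,
      (PySem.List.sorted_perm ys (fun c : Char => c) true).count_eq, Nat.min_comm]

theorem pvAllZero_iff (l : List Char) :
    (l = PySem.List.pyRepeat ['0'] (l.length : Int)) ↔ (l.all (fun ch => ch == '0') = true) := by
  rw [PySem.List.pyRepeat_singleton, Int.toNat_natCast, List.eq_replicate_iff, List.all_eq_true]
  simp

theorem pvPost (l : List Char) :
    (if l = [] then "-1"
     else if l = PySem.List.pyRepeat ['0'] (l.length : Int) then "0" else String.ofList l)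
      = (if l = [] then "-1"
         else if l.all (fun ch => ch == '0') then "0" else String.ofList l) := by
  by_cases h0 : l = []
  · rw [if_pos h0, if_pos h0]
  · rw [if_neg h0, if_neg h0]
    by_cases h1 : l.all (fun ch => ch == '0') = true
    · rw [if_pos ((pvAllZero_iff l).mpr h1), if_pos h1]
    · rw [if_neg (fun hh => h1 ((pvAllZero_iff l).mp hh)), if_neg h1]

-- ===== VERDICT (by name: the statement is the Claim_ definition above) =====
theorem solution_spec : Claim_equal_solution := by
  intro X Y _hd
  unfold Spec_solution solution solution_alt
  have hdead : ∀ A B : List Char, pvListInChars A B = false := by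
    intro A B; simp [pvListInChars]
  simp only [hdead, Bool.false_eq_true, if_false]
  rw [pvLoopA_eq]
  by_cases hlen : (PySem.List.sorted X.toList (fun c => c) true).length >
      (PySem.List.sorted Y.toList (fun c => c) true).length
  · simp only [hlen, if_pos, pvUnvis_replicate_false]
    rw [pvCore_eq, List.nil_append, pvPost]
    rfl
  · simp only [hlen, if_neg, not_false_iff, pvUnvis_replicate_false]
    rw [pvCore_eq', List.nil_append, pvPost]
    rfl
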